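-- pv_equiv track=rewrite | github.com/snow0369/ofex | ofex/utils/dict_utils.py | sub_values
-- ===== SOURCE A (Python) =====
-- from typing import Optional, Any, Callable
--
-- def sub_values(a: Optional[dict], b: Optional[dict]) -> Optional[dict]:
--     if a is None and b is None:
--         return None
--     elif a is None:
--         for k, v in b.items():
--             b[k] = -v
--         return dict(b)
--     elif b is None:
--         return dict(a)
--     ret = dict(a)
--     for k, v in b.items():
--         if k in ret:
--             ret[k] -= v
--         else:
--             ret[k] = -v
--     return ret
-- ===== SOURCE B (Python) =====
-- def sub_values(a, b):
--     if a is None and b is None: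
--         return None
--     elif a is None:
--         for k, v in b.items():
--             b[k] = -v
--         return dict(b)
--     elif b is None:
--         return dict(a)
--     # one pass over the ordered key union {**a, **b}: classify each key
--     return {k: (a[k] - b[k] if k in b else a[k]) if k in a else -b[k]
--             for k in {**a, **b}}
-- ===== Notes on version B (the rewrite author's own statement) =====
-- stated objective: alternative
-- what changed: The main case is rebuilt as a single dict comprehension over the ordered key union {**a, **b} with a three-way classification per key (both / a-only / b-only), instead of copying a and then patching it in a loop over b.
import Mathlib
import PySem

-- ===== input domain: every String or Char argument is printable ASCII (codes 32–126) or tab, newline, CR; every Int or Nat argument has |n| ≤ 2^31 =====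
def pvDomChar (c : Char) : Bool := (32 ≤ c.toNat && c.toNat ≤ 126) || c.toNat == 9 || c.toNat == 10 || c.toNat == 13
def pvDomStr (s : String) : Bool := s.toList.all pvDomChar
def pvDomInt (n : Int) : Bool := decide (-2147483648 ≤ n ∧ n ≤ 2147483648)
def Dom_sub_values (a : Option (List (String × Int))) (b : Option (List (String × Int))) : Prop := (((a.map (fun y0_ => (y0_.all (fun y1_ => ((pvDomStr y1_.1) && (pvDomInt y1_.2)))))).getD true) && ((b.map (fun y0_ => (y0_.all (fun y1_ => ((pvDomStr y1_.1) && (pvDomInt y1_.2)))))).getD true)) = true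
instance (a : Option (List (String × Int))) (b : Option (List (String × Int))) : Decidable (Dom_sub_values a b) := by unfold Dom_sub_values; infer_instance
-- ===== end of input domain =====

-- B rebuilds the main case as one pass over the ordered key union {**a, **b} with a three-way
-- classification per key, instead of A's copy-a-then-patch-from-b loop (objective: alternative;
-- equivalence is about the RETURN value; A and B perform the same in-place negation of b when a is None).

-- ===== PORT A =====
def sub_values (a : Option (List (String × Int))) (b : Option (List (String × Int))) : Option (List (String × Int)) :=
  match a, b with
  | none, none => none
  | none, some bl =>
      -- for k, v in b.items(): b[k] = -v; return dict(b)
      let bd := PySem.Dict.ofList bl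
      some (bd.items.foldl (fun d p => d.insert p.1 (-p.2)) bd).items
  | some al, none => some (PySem.Dict.ofList al).items
  | some al, some bl =>
      -- ret = dict(a); for k, v in b.items(): ret[k] -= v if k in ret else ret[k] = -v
      let ret := (PySem.Dict.ofList bl).items.foldl
        (fun r p => if r.contains p.1 then r.insert p.1 (r.getD p.1 0 - p.2) else r.insert p.1 (-p.2))
        (PySem.Dict.ofList al)
      some ret.items

-- ===== PORT B =====
-- value of key k in B's comprehension: (a[k]-b[k] if k in b else a[k]) if k in a else -b[k]
def subValueB (ad bd : PySem.Dict String Int) (k : String) : Int :=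
  if ad.contains k then (if bd.contains k then ad.getD k 0 - bd.getD k 0 else ad.getD k 0)
  else -(bd.getD k 0)

def sub_values_alt (a : Option (List (String × Int))) (b : Option (List (String × Int))) : Option (List (String × Int)) :=
  match a, b with
  | none, none => none
  | none, some bl =>
      let bd := PySem.Dict.ofList bl
      some (bd.items.foldl (fun d p => d.insert p.1 (-p.2)) bd).items
  | some al, none => some (PySem.Dict.ofList al).items
  | some al, some bl =>
      let ad := PySem.Dict.ofList al
      let bd := PySem.Dict.ofList bl
      -- {k: … for k in {**a, **b}}
      let ks := (ad.update bd.items).keys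
      some ((ks.foldl (fun d k => d.insert k (subValueB ad bd k)) PySem.Dict.empty).items)

-- ===== PRECONDITION & SPEC =====
def Spec_sub_values (a : Option (List (String × Int))) (b : Option (List (String × Int))) (out : Option (List (String × Int))) : Prop := out = sub_values_alt a b
instance (a : Option (List (String × Int))) (b : Option (List (String × Int))) (out : Option (List (String × Int))) : Decidable (Spec_sub_values a b out) := by unfold Spec_sub_values; infer_instance

-- ===== CLAIM (what is proved, stated in full; the proofs are below) =====
def Claim_equal_sub_values : Prop := ∀ (a : Option (List (String × Int))) (b : Option (List (String × Int))), Dom_sub_values a b → Spec_sub_values a b (sub_values a b)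

-- ===== LEMMAS AND PROOFS =====

-- A's loop body, with the if pulled inside the inserted value
lemma subFold_fn_eq :
    (fun (r : PySem.Dict String Int) (p : String × Int) =>
      if r.contains p.1 then r.insert p.1 (r.getD p.1 0 - p.2) else r.insert p.1 (-p.2))
    = (fun r p => r.insert p.1 (if r.contains p.1 then r.getD p.1 0 - p.2 else -p.2)) := by
  funext r p
  by_cases h : r.contains p.1 <;> simp [h]

-- get? after A's patch loop, when the loop's keys are distinct
lemma subFold_get? (l : List (String × Int)) (d : PySem.Dict String Int)
    (hl : (l.map Prod.fst).Nodup) (k : String) :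
    (l.foldl (fun r p => r.insert p.1 (if r.contains p.1 then r.getD p.1 0 - p.2 else -p.2)) d).get? k
    = match l.find? (fun p => p.1 == k) with
      | some p => some (if d.contains k then d.getD k 0 - p.2 else -p.2)
      | none => d.get? k := by
  induction l generalizing d with
  | nil => rfl
  | cons p t ih =>
    simp only [List.map_cons, List.nodup_cons] at hl
    rw [List.foldl_cons, ih _ hl.2]
    by_cases hk : p.1 = k
    · have hfind : t.find? (fun q => q.1 == k) = none := by
        apply List.find?_eq_none.mpr
        intro q hq
        simp only [beq_iff_eq]
        intro h
        apply hl.1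
        rw [hk, ← h]
        exact List.mem_map_of_mem hq
      simp [hk, hfind, PySem.Dict.get?_insert_self]
    · have hne : k ≠ p.1 := fun h => hk h.symm
      simp [hk, PySem.Dict.get?_insert, PySem.Dict.contains_insert,
        PySem.Dict.getD_insert, hne]

lemma sub_values_some_some (al bl : List (String × Int)) :
    sub_values (some al) (some bl) = sub_values_alt (some al) (some bl) := by
  simp only [sub_values, sub_values_alt]
  set ad := PySem.Dict.ofList al with had
  set bd := PySem.Dict.ofList bl with hbd
  have hnad : ad.keys.Nodup := PySem.Dict.nodup_keys_ofList al
  have hnbd : bd.keys.Nodup := PySem.Dict.nodup_keys_ofList bl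
  rw [subFold_fn_eq]
  set R := bd.items.foldl
      (fun r p => r.insert p.1 (if r.contains p.1 then r.getD p.1 0 - p.2 else -p.2)) ad with hR
  -- keys of both results
  have hRkeys : R.keys = PySem.Set.update ad.keys (bd.items.map Prod.fst) :=
    PySem.Dict.keys_foldl_insert_key bd.items Prod.fst
      (fun r p => if r.contains p.1 then r.getD p.1 0 - p.2 else -p.2) ad
  have hks : (ad.update bd.items).keys = PySem.Set.update ad.keys (bd.items.map Prod.fst) :=
    PySem.Dict.keys_foldl_insert_key bd.items Prod.fst (fun _ p => p.2) ad
  have hRnodup : R.keys.Nodup :=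
    PySem.Dict.nodup_keys_foldl_insert_key bd.items Prod.fst _ ad hnad
  have hksnodup : (ad.update bd.items).keys.Nodup := by
    rw [hks, ← hRkeys]; exact hRnodup
  -- B's comprehension over fresh distinct keys
  have hB : ((ad.update bd.items).keys.foldl
      (fun d k => d.insert k (subValueB ad bd k)) PySem.Dict.empty).items
      = (ad.update bd.items).keys.map (fun k => (k, subValueB ad bd k)) := by
    have := PySem.Dict.items_foldl_insert_fresh (l := (ad.update bd.items).keys)
      (k := id) (v := fun k => subValueB ad bd k) (d := PySem.Dict.empty)
      (by intro a _; simp [PySem.Dict.contains_empty]) (by simpa using hksnodup)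
    simpa using this
  rw [hB]
  -- A's result as a map over its keys
  have hA : R.items = R.keys.map (fun k => (k, R.getD k 0)) :=
    PySem.Dict.items_eq_map_keys R hRnodup 0
  rw [hA, hRkeys, ← hks]
  congr 1
  apply List.map_congr_left
  intro k hk
  have hkmem : k ∈ ad.keys ∨ k ∈ bd.keys := by
    rw [hks] at hk
    exact (PySem.Set.mem_update _ _ _).mp hk
  have hget := subFold_get? bd.items ad (by exact hnbd) k
  have hbfind : bd.get? k = (bd.items.find? (fun p => p.1 == k)).map (·.2) := rfl
  rw [PySem.Dict.getD_eq_get?_getD, ← hR] at *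
  rw [hget]
  cases hfind : bd.items.find? (fun p => p.1 == k) with
  | some p =>
    have hbg : bd.get? k = some p.2 := by rw [hbfind, hfind]; rfl
    have hbc : bd.contains k = true := by
      rw [PySem.Dict.contains_eq_isSome_get?, hbg]; rfl
    have hbgd : bd.getD k 0 = p.2 := PySem.Dict.getD_of_get?_eq_some bd 0 hbg
    simp only [subValueB, hbc, if_true, Option.getD_some]
    by_cases hac : ad.contains k = true
    · simp [hac, hbgd, PySem.Dict.getD_eq_get?_getD]
    · simp only [Bool.not_eq_true] at hac
      simp [hac, hbgd]
  | none =>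
    have hbg : bd.get? k = none := by rw [hbfind, hfind]; rfl
    have hbc : bd.contains k = false := by
      rw [PySem.Dict.contains_eq_isSome_get?, hbg]; rfl
    have hka : k ∈ ad.keys := by
      rcases hkmem with h | h
      · exact h
      · exact absurd ((PySem.Dict.contains_iff_mem_keys bd k).mpr h) (by simp [hbc])
    have hac : ad.contains k = true := (PySem.Dict.contains_iff_mem_keys ad k).mpr hka
    simp only [subValueB, hbc, hac, if_true, Bool.false_eq_true, if_false]
    rw [PySem.Dict.getD_eq_get?_getD]

-- ===== VERDICT (by name: the statement is the Claim_ definition above) =====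
theorem sub_values_spec : Claim_equal_sub_values := by
  intro a b _
  unfold Spec_sub_values
  match a, b with
  | none, none => rfl
  | none, some bl => rfl
  | some al, none => rfl
  | some al, some bl => exact sub_values_some_some al bl
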